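-- pv_equiv track=rewrite | github.com/Giovoig/Aggregation-engine | SCRIPTS/partition_graph.py | find_2d
-- ===== SOURCE A (Python) =====
-- def find_2d(target, lst_2d):
--     pos = 0
--     for i, lst in enumerate(lst_2d):
--         for j, element in enumerate(lst):
--             if int(element) == int(target):
--                 return(i, j, pos)
--             pos = pos+1
--     return(None, None, None)
-- ===== SOURCE B (Python) =====
-- def find_2d(target, lst_2d):
--     flat = [(i, j, element) for i, lst in enumerate(lst_2d) for j, element in enumerate(lst)]
--     for pos, (i, j, element) in enumerate(flat):
--         if int(element) == int(target):
--             return (i, j, pos)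
--     return (None, None, None)
-- ===== Notes on version B (the rewrite author's own statement) =====
-- stated objective: alternative
-- what changed: Replaces the two-level nested scan with a hand-incremented flat counter by first building a flattened (i, j, element) list and then doing a single enumerate-driven pass, so the flat position comes from enumeration instead of manual incrementing.
import Mathlib
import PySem

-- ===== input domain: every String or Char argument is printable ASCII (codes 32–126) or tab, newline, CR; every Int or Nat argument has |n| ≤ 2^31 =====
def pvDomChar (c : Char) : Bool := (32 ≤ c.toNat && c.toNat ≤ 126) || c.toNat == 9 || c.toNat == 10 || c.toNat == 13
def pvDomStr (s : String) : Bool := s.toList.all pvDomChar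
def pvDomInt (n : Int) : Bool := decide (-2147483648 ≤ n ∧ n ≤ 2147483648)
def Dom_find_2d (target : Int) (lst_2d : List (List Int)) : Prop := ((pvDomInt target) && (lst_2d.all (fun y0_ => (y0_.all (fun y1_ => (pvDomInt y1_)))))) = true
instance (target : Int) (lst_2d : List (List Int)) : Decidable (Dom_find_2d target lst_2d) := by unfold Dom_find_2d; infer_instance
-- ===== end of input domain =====

-- B replaces the nested scan with a hand-incremented counter by building a flat (i, j, element)
-- list once and doing a single enumerate-driven pass (objective: alternative decomposition).

-- ===== PORT A =====
-- inner 'for j, element in enumerate(lst)' loop; carries the running flat counter pos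
def find_2d_inner (target i pos j : Int) : List Int → (Option (Int × Int × Int)) × Int
  | [] => (none, pos)
  | e :: rest =>
    if e = target then (some (i, j, pos), pos)
    else find_2d_inner target i (pos + 1) (j + 1) rest

-- outer 'for i, lst in enumerate(lst_2d)' loop
def find_2d_outer (target i pos : Int) : List (List Int) → Option (Int × Int × Int)
  | [] => none
  | lst :: rest =>
    match find_2d_inner target i pos 0 lst with
    | (some r, _) => some r
    | (none, pos') => find_2d_outer target (i + 1) pos' rest

def find_2d (target : Int) (lst_2d : List (List Int)) : Option Int × Option Int × Option Int :=
  match find_2d_outer target 0 0 lst_2d with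
  | some (i, j, p) => (some i, some j, some p)
  | none => (none, none, none)

-- ===== PORT B =====
-- 'for pos, (i, j, element) in enumerate(flat)' loop
def find_2d_alt_loop (target : Int) : List (Int × Int × Int × Int) → Option Int × Option Int × Option Int
  | [] => (none, none, none)
  | (pos, i, j, e) :: rest =>
    if e = target then (some i, some j, some pos)
    else find_2d_alt_loop target rest

def find_2d_alt (target : Int) (lst_2d : List (List Int)) : Option Int × Option Int × Option Int :=
  let flat := (PySem.List.enumerate lst_2d 0).flatMap
    (fun p => (PySem.List.enumerate p.2 0).map (fun q => (p.1, q.1, q.2)))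
  find_2d_alt_loop target (PySem.List.enumerate flat 0)

-- ===== PRECONDITION & SPEC =====
def Spec_find_2d (target : Int) (lst_2d : List (List Int)) (out : Option Int × Option Int × Option Int) : Prop := out = find_2d_alt target lst_2d
instance (target : Int) (lst_2d : List (List Int)) (out : Option Int × Option Int × Option Int) : Decidable (Spec_find_2d target lst_2d out) := by unfold Spec_find_2d; infer_instance

-- ===== CLAIM (what is proved, stated in full; the proofs are below) =====
def Claim_equal_find_2d : Prop := ∀ (target : Int) (lst_2d : List (List Int)), Dom_find_2d target lst_2d → Spec_find_2d target lst_2d (find_2d target lst_2d)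

-- ===== LEMMAS AND PROOFS =====

-- if the inner loop finds no match, the final counter is pos + length
theorem inner_none_snd (target i : Int) (lst : List Int) :
    ∀ pos j : Int, (find_2d_inner target i pos j lst).1 = none →
      (find_2d_inner target i pos j lst).2 = pos + lst.length := by
  induction lst with
  | nil => intro pos j _; simp [find_2d_inner]
  | cons e rest ih =>
    intro pos j h
    by_cases he : e = target
    · simp [find_2d_inner, he] at h
    · simp only [find_2d_inner, if_neg he] at h ⊢
      have := ih (pos + 1) (j + 1) h
      rw [this]; simp; ring

-- B's single pass over the enumerated row-i block followed by any tail ys behaves as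
-- A's inner loop followed by the pass over ys
theorem row_lemma (target i : Int) (lst : List Int) :
    ∀ (j pos : Int) (ys : List (Int × Int × Int × Int)),
      find_2d_alt_loop target
        (PySem.List.enumerate ((PySem.List.enumerate lst j).map (fun q => (i, q.1, q.2))) pos ++ ys)
      = match find_2d_inner target i pos j lst with
        | (some (a, b, c), _) => (some a, some b, some c)
        | (none, _) => find_2d_alt_loop target ys := by
  induction lst with
  | nil => intro j pos ys; simp [PySem.List.enumerate_nil, find_2d_inner]
  | cons e rest ih =>
    intro j pos ys
    rw [PySem.List.enumerate_cons]
    simp only [List.map_cons, PySem.List.enumerate_cons, List.cons_append]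
    by_cases he : e = target
    · simp [find_2d_alt_loop, find_2d_inner, he]
    · simp only [find_2d_alt_loop, find_2d_inner, if_neg he]
      exact ih (j + 1) (pos + 1) ys

-- main invariant: A's outer loop from (i, pos) equals B's pass over the enumerated
-- flattening of the remaining rows, enumerated from pos with row indices from i
theorem main_lemma (target : Int) (L : List (List Int)) :
    ∀ i pos : Int,
      (match find_2d_outer target i pos L with
       | some (a, b, c) => (some a, some b, some c)
       | none => ((none : Option Int), (none : Option Int), (none : Option Int)))
      = find_2d_alt_loop target
          (PySem.List.enumerate
            ((PySem.List.enumerate L i).flatMap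
              (fun p => (PySem.List.enumerate p.2 0).map (fun q => (p.1, q.1, q.2)))) pos) := by
  induction L with
  | nil =>
    intro i pos
    simp [find_2d_outer, PySem.List.enumerate_nil, find_2d_alt_loop]
  | cons lst rest ih =>
    intro i pos
    rw [PySem.List.enumerate_cons]
    simp only [List.flatMap_cons, PySem.List.enumerate_append]
    rw [row_lemma]
    cases hinner : find_2d_inner target i pos 0 lst with
    | mk fst pos' =>
      cases fst with
      | some r =>
        obtain ⟨a, b, c⟩ := r
        simp [find_2d_outer, hinner]
      | none =>
        have hlen : ((lst.map (fun e => e)).length : Int) = lst.length := by simp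
        have hsnd : pos' = pos + lst.length := by
          have := inner_none_snd target i lst pos 0 (by rw [hinner])
          rw [hinner] at this; exact this
        simp only [find_2d_outer, hinner]
        rw [ih (i + 1) pos']
        congr 2
        simp [hsnd]

-- ===== VERDICT (by name: the statement is the Claim_ definition above) =====
theorem find_2d_spec : Claim_equal_find_2d := by
  intro target lst_2d _
  unfold Spec_find_2d find_2d find_2d_alt
  exact main_lemma target lst_2d 0 0
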